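-- pv_equiv track=rewrite | github.com/ahmadruswandi/crawl-stock-market-api | crawl/engine/market-stock.py | get_info_segment
-- ===== SOURCE A (Python) =====
-- def get_info_segment(seglist, segment_text):
--
--     b_segment = False
--     segment_arr = []
--     for idx, c in enumerate(seglist):
--         if c.lower().__contains__("<strong>"):
--             b_segment = c.lower().__contains__(segment_text)
--
--         if b_segment:
--             segment_arr.append(c)
--
--     return segment_arr[1:]
-- ===== SOURCE B (Python) =====
-- def get_info_segment(seglist, segment_text):
--     # Partition seglist into groups, each group starting at an element whose
--     # lowercase contains "<strong>"; elements before the first such element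
--     # are discarded.  Keep the groups whose first element matches
--     # segment_text, flatten them in order, and drop the first element.
--     groups = []
--     cur = None
--     for c in seglist:
--         if "<strong>" in c.lower():
--             if cur is not None:
--                 groups.append(cur)
--             cur = [c]
--         elif cur is not None:
--             cur.append(c)
--     if cur is not None:
--         groups.append(cur)
--     flat = [x for g in groups if segment_text in g[0].lower() for x in g]
--     return flat[1:]
-- ===== Notes on version B (the rewrite author's own statement) =====
-- stated objective: alternative
-- what changed: Replaced A's running boolean toggle with an explicit partition of the list into <strong>-started groups, then filter the groups by their first element and flatten, dropping the first element of the result.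
import Mathlib
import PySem

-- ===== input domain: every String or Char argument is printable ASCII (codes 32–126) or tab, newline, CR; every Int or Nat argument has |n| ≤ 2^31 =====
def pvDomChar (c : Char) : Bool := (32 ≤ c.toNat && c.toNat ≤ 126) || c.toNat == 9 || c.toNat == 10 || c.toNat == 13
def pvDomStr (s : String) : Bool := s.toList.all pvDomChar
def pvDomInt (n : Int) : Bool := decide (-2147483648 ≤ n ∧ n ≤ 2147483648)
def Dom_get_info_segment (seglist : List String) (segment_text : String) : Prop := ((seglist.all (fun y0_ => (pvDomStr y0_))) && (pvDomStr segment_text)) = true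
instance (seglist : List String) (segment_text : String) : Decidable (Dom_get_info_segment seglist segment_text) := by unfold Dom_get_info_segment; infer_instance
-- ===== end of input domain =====

-- B replaces A's running boolean toggle by an explicit partition into <strong>-started
-- groups, filtered by their first element and flattened (objective: alternative).

-- ===== PORT A =====
-- loop body of A: state is (b_segment, segment_arr); the enumerate index is unused
def pvStepA (segment_text : String) (st : Bool × List String) (ic : Int × String) : Bool × List String :=
  let c := ic.2
  let b := if PySem.Str.isIn "<strong>" (PySem.Str.lower c)
           then PySem.Str.isIn segment_text (PySem.Str.lower c) else st.1
  (b, if b then st.2 ++ [c] else st.2)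

def get_info_segment (seglist : List String) (segment_text : String) : List String :=
  let r := (PySem.List.enumerate seglist 0).foldl (pvStepA segment_text) (false, [])
  PySem.List.slice r.2 (some 1) none

-- ===== PORT B =====
-- loop body of B: state is (groups, cur); cur = none plays Python's `cur is None`
def pvStepB (st : List (List String) × Option (List String)) (c : String) :
    List (List String) × Option (List String) :=
  if PySem.Str.isIn "<strong>" (PySem.Str.lower c) then
    ((match st.2 with | some cur => st.1 ++ [cur] | none => st.1), some [c])
  else
    match st.2 with
    | some cur => (st.1, some (cur ++ [c]))
    | none => st

def get_info_segment_alt (seglist : List String) (segment_text : String) : List String :=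
  let st := seglist.foldl pvStepB ([], none)
  let groups := st.1 ++ (match st.2 with | some cur => [cur] | none => [])
  -- g[0] ported as g.headD "": every group built by the loop is nonempty
  let flat := (groups.filter
      (fun g => PySem.Str.isIn segment_text (PySem.Str.lower (g.headD "")))).flatten
  PySem.List.slice flat (some 1) none

-- ===== PRECONDITION & SPEC =====
def Spec_get_info_segment (seglist : List String) (segment_text : String) (out : List String) : Prop := out = get_info_segment_alt seglist segment_text
instance (seglist : List String) (segment_text : String) (out : List String) : Decidable (Spec_get_info_segment seglist segment_text out) := by unfold Spec_get_info_segment; infer_instance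

-- ===== CLAIM (what is proved, stated in full; the proofs are below) =====
def Claim_equal_get_info_segment : Prop := ∀ (seglist : List String) (segment_text : String), Dom_get_info_segment seglist segment_text → Spec_get_info_segment seglist segment_text (get_info_segment seglist segment_text)

-- ===== LEMMAS AND PROOFS =====

def pvStrong (c : String) : Bool := PySem.Str.isIn "<strong>" (PySem.Str.lower c)
def pvKeep (t c : String) : Bool := PySem.Str.isIn t (PySem.Str.lower c)

-- common specification: the elements collected from l when the running flag starts as b
def pvG (t : String) : Bool → List String → List String
  | _, [] => []
  | b, c :: l =>
    let b' := if pvStrong c then pvKeep t c else b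
    (if b' then [c] else []) ++ pvG t b' l

def pvFlag (t : String) (b : Bool) (l : List String) : Bool :=
  l.foldl (fun b c => if pvStrong c then pvKeep t c else b) b

def pvFinal (st : List (List String) × Option (List String)) : List (List String) :=
  st.1 ++ (match st.2 with | some cur => [cur] | none => [])

def pvFlat (t : String) (gs : List (List String)) : List String :=
  (gs.filter (fun g => pvKeep t (g.headD ""))).flatten

def pvCurFlag (t : String) : Option (List String) → Bool
  | none => false
  | some g => pvKeep t (g.headD "")

lemma pvA_fold (t : String) (l : List String) :
    ∀ (s : Int) (b : Bool) (out : List String),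
      (PySem.List.enumerate l s).foldl (pvStepA t) (b, out)
        = (pvFlag t b l, out ++ pvG t b l) := by
  induction l with
  | nil => intro s b out; simp [pvFlag, pvG]
  | cons c l ih =>
    intro s b out
    simp only [PySem.List.enumerate_cons, List.foldl_cons, pvStepA, pvFlag, pvG,
      List.foldl_cons]
    rw [ih]
    by_cases hs : pvStrong c <;> by_cases hk : pvKeep t c <;>
      simp [pvStrong, pvKeep, pvFlag] at hs hk ⊢ <;>
      simp [hs, hk] <;> cases b <;> simp

lemma pvFlat_append (t : String) (xs ys : List (List String)) :
    pvFlat t (xs ++ ys) = pvFlat t xs ++ pvFlat t ys := by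
  simp [pvFlat, List.filter_append]

lemma pvFlat_singleton (t : String) (g : List String) :
    pvFlat t [g] = if pvKeep t (g.head?.getD "") then g else [] := by
  by_cases hk : pvKeep t (g.head?.getD "") <;> simp [pvFlat, List.filter, hk]

lemma pvB_fold (t : String) (l : List String) :
    ∀ (groups : List (List String)) (cur : Option (List String)),
      (∀ g, cur = some g → g ≠ []) →
      pvFlat t (pvFinal (l.foldl pvStepB (groups, cur)))
        = pvFlat t (pvFinal (groups, cur)) ++ pvG t (pvCurFlag t cur) l := by
  induction l with
  | nil => intro groups cur _; simp [pvG]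
  | cons c l ih =>
    intro groups cur hcur
    rw [List.foldl_cons]
    by_cases hs : PySem.Str.isIn "<strong>" (PySem.Str.lower c) = true
    · have hsS : pvStrong c = true := hs
      cases cur with
      | none =>
        have hstep : pvStepB (groups, none) c = (groups, some [c]) := by
          simp only [pvStepB, hs, if_pos]
        rw [hstep, ih _ (some [c]) (by intro g hg; cases hg; simp)]
        simp only [pvG, pvCurFlag, hsS, if_pos, List.headD_cons]
        by_cases hk : pvKeep t c <;>
          simp [pvFlat, pvFinal, List.filter_append, hk]
      | some g =>
        have hstep : pvStepB (groups, some g) c = (groups ++ [g], some [c]) := by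
          simp only [pvStepB, hs, if_pos]
        rw [hstep, ih _ (some [c]) (by intro g' hg'; cases hg'; simp)]
        have hfin1 : pvFinal (groups ++ [g], some [c]) = groups ++ [g] ++ [[c]] := rfl
        have hfin2 : pvFinal (groups, some g) = groups ++ [g] := rfl
        rw [hfin1, hfin2, pvFlat_append, pvFlat_append]
        simp only [pvG, pvCurFlag, hsS, if_pos, pvFlat_singleton, List.headD_cons,
          List.head?_cons, Option.getD_some]
        by_cases hk : pvKeep t c <;>
          by_cases hkg : pvKeep t (g.head?.getD "") <;> simp [hk, hkg]
    · have hsS : pvStrong c = false := by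
        simp only [pvStrong]; exact eq_false_of_ne_true hs
      cases cur with
      | none =>
        have hstep : pvStepB (groups, none) c = (groups, none) := by
          simp only [pvStepB, hs, if_neg, Bool.false_eq_true, not_false_iff]
        rw [hstep, ih _ none (by intro g hg; cases hg)]
        simp [pvG, pvCurFlag, hsS]
      | some g =>
        have hg : g ≠ [] := hcur g rfl
        have hstep : pvStepB (groups, some g) c = (groups, some (g ++ [c])) := by
          simp only [pvStepB, hs, if_neg, Bool.false_eq_true, not_false_iff]
        rw [hstep, ih _ (some (g ++ [c])) (by intro g' hg'; cases hg'; simp)]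
        have hhead : (g ++ [c]).head?.getD "" = g.head?.getD "" := by
          cases g with | nil => exact absurd rfl hg | cons a tl => simp
        have hfin1 : pvFinal (groups, some (g ++ [c])) = groups ++ [g ++ [c]] := rfl
        have hfin2 : pvFinal (groups, some g) = groups ++ [g] := rfl
        rw [hfin1, hfin2, pvFlat_append, pvFlat_append, pvFlat_singleton, pvFlat_singleton,
          hhead]
        simp only [pvG, pvCurFlag, hsS, Bool.false_eq_true, if_false,
          List.headD_eq_head?_getD, hhead]
        by_cases hk : pvKeep t (g.head?.getD "") <;> simp [hk]

-- ===== VERDICT (by name: the statement is the Claim_ definition above) =====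
theorem get_info_segment_spec : Claim_equal_get_info_segment := by
  intro seglist segment_text _
  unfold Spec_get_info_segment get_info_segment get_info_segment_alt
  have hA := pvA_fold segment_text seglist 0 false []
  have hB := pvB_fold segment_text seglist [] none (by intro g hg; cases hg)
  simp only [hA]
  have : (seglist.foldl pvStepB ([], none)).1
      ++ (match (seglist.foldl pvStepB ([], none)).2 with
          | some cur => [cur] | none => ([] : List (List String)))
      = pvFinal (seglist.foldl pvStepB ([], none)) := by
    simp [pvFinal]
  rw [this]
  have hB' : pvFlat segment_text (pvFinal (seglist.foldl pvStepB ([], none)))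
      = pvG segment_text false seglist := by
    rw [hB]; simp [pvFlat, pvFinal, pvCurFlag]
  simp only [pvFlat, pvKeep] at hB'
  rw [hB']
  simp
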